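-- pv_equiv track=rewrite | github.com/anshumanbehera27/dsa-python-codingninjas | recursion/count zero.py | countzero
-- ===== SOURCE A (Python) =====
-- def countzero(n):
--     if n <0 :
--         n = n* -1
--     if n< 10 :
--         if n == 0 :
--             return 1
--         return 0
--     smallans = countzero(n//10)
--     if n % 10 == 0 :
--         smallans += 1
--     return smallans
-- ===== SOURCE B (Python) =====
-- def countzero(n):
--     if n < 0:
--         n = -n
--     if n == 0:
--         return 1
--     count = 0
--     while n >= 10:
--         if n % 10 == 0:
--             count += 1
--         n //= 10
--     return count
-- ===== Notes on version B (the rewrite author's own statement) =====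
-- stated objective: idiomatic
-- what changed: Replaced the recursive descent with an explicit iterative while-loop carrying a counter accumulator (sign normalized once, n == 0 special-cased up front).
import Mathlib
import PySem

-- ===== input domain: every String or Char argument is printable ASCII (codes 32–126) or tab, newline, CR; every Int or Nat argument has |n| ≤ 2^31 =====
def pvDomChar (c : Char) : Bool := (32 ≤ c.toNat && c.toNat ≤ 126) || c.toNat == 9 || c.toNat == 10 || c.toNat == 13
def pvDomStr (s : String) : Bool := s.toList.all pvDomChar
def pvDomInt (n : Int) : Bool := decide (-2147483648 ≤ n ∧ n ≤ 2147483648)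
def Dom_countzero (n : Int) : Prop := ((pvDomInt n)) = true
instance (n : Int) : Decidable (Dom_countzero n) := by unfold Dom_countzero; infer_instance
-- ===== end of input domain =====

-- B replaces A's recursive descent by an explicit iterative while-loop with a counter accumulator (idiomatic; return value only).

-- ===== PORT A =====
-- recursion on |n|; each call re-normalizes the sign like the Python
def countzero (n : Int) : Int :=
  let m := if n < 0 then n * -1 else n
  if h : m < 10 then
    if m = 0 then 1 else 0
  else
    let smallans := countzero (PySem.Int.floordiv m 10)
    if PySem.Int.mod m 10 = 0 then smallans + 1 else smallans
termination_by (if n < 0 then n * -1 else n).toNat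
decreasing_by
  rw [PySem.Int.floordiv_eq_ediv_of_pos (by omega)]
  have h' : ¬ (if n < 0 then n * -1 else n) < 10 := h
  split_ifs at h' ⊢ <;> omega

-- ===== PORT B =====
-- the while-loop of Source B: state (n, count)
def countzeroLoop (n : Int) (count : Int) : Int :=
  if h : 10 ≤ n then
    countzeroLoop (PySem.Int.floordiv n 10)
      (if PySem.Int.mod n 10 = 0 then count + 1 else count)
  else count
termination_by n.toNat
decreasing_by
  rw [PySem.Int.floordiv_eq_ediv_of_pos (by omega)]
  omega

def countzero_alt (n : Int) : Int :=
  let m := if n < 0 then -n else n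
  if m = 0 then 1 else countzeroLoop m 0

-- ===== PRECONDITION & SPEC =====
def Spec_countzero (n : Int) (out : Int) : Prop := out = countzero_alt n
instance (n : Int) (out : Int) : Decidable (Spec_countzero n out) := by unfold Spec_countzero; infer_instance

-- ===== CLAIM (what is proved, stated in full; the proofs are below) =====
def Claim_equal_countzero : Prop := ∀ (n : Int), Dom_countzero n → Spec_countzero n (countzero n)

-- ===== LEMMAS AND PROOFS =====

-- the loop's accumulator invariant: for n ≥ 10 it adds A's count of n to the accumulator
theorem countzeroLoop_eq (n : Int) (h : 10 ≤ n) (c : Int) :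
    countzeroLoop n c = c + countzero n := by
  rw [countzeroLoop, countzero]
  have hpos : ¬ n < 0 := by omega
  simp only [hpos, if_false, dif_pos h]
  have hd : PySem.Int.floordiv n 10 = n / 10 :=
    PySem.Int.floordiv_eq_ediv_of_pos (by omega)
  have hnot : ¬ n < 10 := by omega
  rw [dif_neg hnot]
  by_cases h10 : 10 ≤ PySem.Int.floordiv n 10
  · rw [countzeroLoop_eq _ h10]
    split_ifs <;> ring
  · -- quotient is a single nonzero digit: its recursive count is 0
    rw [countzeroLoop, dif_neg h10]
    have hq : 1 ≤ n / 10 := by omega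
    have hq' : n / 10 < 10 := by rw [hd] at h10; omega
    have : countzero (PySem.Int.floordiv n 10) = 0 := by
      rw [countzero, hd]
      have : ¬ n / 10 < 0 := by omega
      simp only [this, if_false, dif_pos hq']
      rw [if_neg (by omega)]
    rw [this]
    split_ifs <;> ring
termination_by n.toNat
decreasing_by
  rw [PySem.Int.floordiv_eq_ediv_of_pos (by omega)]
  omega

-- ===== VERDICT (by name: the statement is the Claim_ definition above) =====
theorem countzero_spec : Claim_equal_countzero := by
  intro n _
  unfold Spec_countzero countzero_alt
  set m : Int := if n < 0 then -n else n with hm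
  have hm0 : 0 ≤ m := by rw [hm]; split_ifs <;> omega
  have hA : countzero n = countzero m := by
    rw [countzero]
    have : (if n < 0 then n * -1 else n) = m := by rw [hm]; split_ifs <;> ring
    rw [this]
    conv_rhs => rw [countzero]
    have : (if m < 0 then m * -1 else m) = m := by rw [if_neg (by omega)]
    rw [this]
  rw [hA]
  by_cases hz : m = 0
  · rw [if_pos hz]
    rw [countzero]
    simp only [hz]
    norm_num
  · rw [if_neg hz]
    by_cases hlt : m < 10
    · rw [countzeroLoop, dif_neg (by omega)]
      rw [countzero]
      rw [if_neg (by omega), dif_pos (by omega), if_neg hz]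
    · rw [countzeroLoop_eq m (by omega)]
      ring
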